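-- pv_equiv track=rewrite | github.com/ellimac-lg/BatailleNavale | jeu.py | check_boat
-- ===== SOURCE A (Python) =====
-- def boat_coordinates (boat):
--     "retourne un tableau de coordonnéées du bateau"
--     (ligne, colonne, longueur, horizontal) = boat
--     coordinates = []
--     for i in range(longueur):
--         if horizontal:
--             coordinates.append((ligne, colonne+i))
--         else:
--             coordinates.append((ligne+i, colonne))
--     return coordinates
--
-- def check_boat (new_boat, boats):
--     "vérifie qu'un bateaux ne se chevauchent pas les autres et que sa longueur n'est pas déjà utilisée"
--     # check pas de croisements des bateaux
--     new_boat_coords = boat_coordinates(new_boat)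
--     for each_boat in boats:
--         each_boat_coords = boat_coordinates(each_boat)
--         for nbcoord in new_boat_coords:
--             for ebcoord in each_boat_coords:
--                 if nbcoord == ebcoord:
--                     return False
--
--     # check que le bateau ne dépasse pas de la grille
--     (ligne, colonne, longueur, horizontal) = new_boat
--     if horizontal:
--         if colonne -1 + longueur > 10: # dépassement à droite
--             return False
--     else:
--         if ligne -1 + longueur > 10: # dépassement en bas
--             return False
--
--     # si tout s'est bien passé jusque là le bateau est valide
--     return True
-- ===== SOURCE B (Python) =====
-- def check_boat(new_boat, boats):
--     "vérifie qu'un bateaux ne se chevauchent pas les autres et que sa longueur n'est pas déjà utilisée"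
--     # One boolean expression: no bounding-box of any existing boat intersects the
--     # new boat's bounding box, and the new boat fits inside the grid.
--     l, c, L, h = new_boat
--     r1 = l + (0 if h else L - 1)          # last row occupied (r0 = l)
--     c1 = c + (L - 1 if h else 0)          # last column occupied (c0 = c)
--     clear = all(not (max(l, bl) <= min(r1, bl + (0 if bh else bL - 1))
--                      and max(c, bc) <= min(c1, bc + (bL - 1 if bh else 0)))
--                 for (bl, bc, bL, bh) in boats)
--     fits = (c if h else l) - 1 + L <= 10
--     return clear and fits
-- ===== Notes on version B (the rewrite author's own statement) =====
-- stated objective: faster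
-- what changed: Replaces the triple-nested comparison of materialised coordinate lists with an O(1) interval-intersection test per boat, folded into a single all(...) and grid-fit conjunction.
import Mathlib
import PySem

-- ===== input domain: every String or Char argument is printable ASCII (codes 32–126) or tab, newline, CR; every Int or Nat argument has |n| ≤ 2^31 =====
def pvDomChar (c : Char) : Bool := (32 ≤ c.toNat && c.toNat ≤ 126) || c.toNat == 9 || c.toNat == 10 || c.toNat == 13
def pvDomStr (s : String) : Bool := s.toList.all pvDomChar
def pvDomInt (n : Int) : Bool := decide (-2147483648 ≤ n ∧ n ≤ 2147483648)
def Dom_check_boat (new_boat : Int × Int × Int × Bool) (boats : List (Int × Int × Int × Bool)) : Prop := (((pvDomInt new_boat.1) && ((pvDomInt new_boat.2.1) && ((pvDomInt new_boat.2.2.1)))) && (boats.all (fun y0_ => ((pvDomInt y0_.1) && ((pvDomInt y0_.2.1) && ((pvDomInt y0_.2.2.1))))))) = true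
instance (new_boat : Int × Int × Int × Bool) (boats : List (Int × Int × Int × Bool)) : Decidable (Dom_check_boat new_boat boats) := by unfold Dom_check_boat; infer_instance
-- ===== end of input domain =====

-- B replaces the triple-nested cell-by-cell overlap scan with an O(1) interval-intersection
-- test per boat, returned as a single conjunction with the grid-fit test.


-- ===== PORT A =====
def boat_coordinates (boat : Int × Int × Int × Bool) : List (Int × Int) :=
  let (ligne, colonne, longueur, horizontal) := boat
  (PySem.List.pyRange 0 longueur 1).foldl
    (fun coordinates i =>
      if horizontal then coordinates ++ [(ligne, colonne + i)]
      else coordinates ++ [(ligne + i, colonne)]) []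

def check_boat (new_boat : Int × Int × Int × Bool) (boats : List (Int × Int × Int × Bool)) : Bool :=
  let new_boat_coords := boat_coordinates new_boat
  -- the triple nested loop with early 'return False': false iff some pair of cells coincides
  if boats.any (fun each_boat =>
       let each_boat_coords := boat_coordinates each_boat
       new_boat_coords.any (fun nbcoord =>
         each_boat_coords.any (fun ebcoord => nbcoord = ebcoord))) then false
  else
    let (ligne, colonne, longueur, horizontal) := new_boat
    if horizontal then
      if colonne - 1 + longueur > 10 then false else true
    else
      if ligne - 1 + longueur > 10 then false else true

-- ===== PORT B =====
-- B: inline interval endpoints; 'clear' is one pass of interval-intersection tests,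
-- conjoined with the grid-fit test.
def check_boat_alt (new_boat : Int × Int × Int × Bool) (boats : List (Int × Int × Int × Bool)) : Bool :=
  let (l, c, L, h) := new_boat
  let r1 := l + (if h then 0 else L - 1)
  let c1 := c + (if h then L - 1 else 0)
  let clear := boats.all (fun b =>
    let (bl, bc, bL, bh) := b
    !(decide (max l bl ≤ min r1 (bl + (if bh then 0 else bL - 1))) &&
      decide (max c bc ≤ min c1 (bc + (if bh then bL - 1 else 0)))))
  let fits := decide ((if h then c else l) - 1 + L ≤ 10)
  clear && fits

-- ===== PRECONDITION & SPEC =====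
def Spec_check_boat (new_boat : Int × Int × Int × Bool) (boats : List (Int × Int × Int × Bool)) (out : Bool) : Prop := out = check_boat_alt new_boat boats
instance (new_boat : Int × Int × Int × Bool) (boats : List (Int × Int × Int × Bool)) (out : Bool) : Decidable (Spec_check_boat new_boat boats out) := by unfold Spec_check_boat; infer_instance

-- ===== CLAIM (what is proved, stated in full; the proofs are below) =====
def Claim_equal_check_boat : Prop := ∀ (new_boat : Int × Int × Int × Bool) (boats : List (Int × Int × Int × Bool)), Dom_check_boat new_boat boats → Spec_check_boat new_boat boats (check_boat new_boat boats)

-- ===== LEMMAS AND PROOFS =====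

lemma foldl_app_singleton {α : Type} (g : Int → α) (xs : List Int) (acc : List α) :
    xs.foldl (fun a i => a ++ [g i]) acc = acc ++ xs.map g := by
  induction xs generalizing acc with
  | nil => simp
  | cons x xs ih => simp [List.foldl_cons, ih]

lemma boat_coordinates_eq (ligne colonne longueur : Int) (horizontal : Bool) :
    boat_coordinates (ligne, colonne, longueur, horizontal) =
      (PySem.List.pyRange 0 longueur 1).map
        (fun i => if horizontal then (ligne, colonne + i) else (ligne + i, colonne)) := by
  unfold boat_coordinates
  dsimp only
  have : (fun (coordinates : List (Int × Int)) (i : Int) =>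
      if horizontal then coordinates ++ [(ligne, colonne + i)]
      else coordinates ++ [(ligne + i, colonne)]) =
      fun coordinates i => coordinates ++
        [if horizontal then (ligne, colonne + i) else (ligne + i, colonne)] := by
    funext a i; split <;> rfl
  rw [this, foldl_app_singleton]
  rfl

-- a pair of cells coincides iff the two occupied intervals intersect on both axes
lemma collide_eq_box (l c L : Int) (h : Bool) (l' c' L' : Int) (h' : Bool) :
    ((boat_coordinates (l, c, L, h)).any (fun nb =>
        (boat_coordinates (l', c', L', h')).any (fun eb => nb = eb))) =
    (decide (max l l' ≤ min (l + (if h then 0 else L - 1)) (l' + (if h' then 0 else L' - 1))) &&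
     decide (max c c' ≤ min (c + (if h then L - 1 else 0)) (c' + (if h' then L' - 1 else 0)))) := by
  rw [Bool.eq_iff_iff]
  simp only [boat_coordinates_eq, List.any_eq_true, List.mem_map,
    PySem.List.mem_pyRange_one, Bool.and_eq_true, decide_eq_true_eq]
  cases h <;> cases h' <;>
    simp only [if_true, if_false, Bool.false_eq_true] <;> constructor
  · rintro ⟨x, ⟨i, hi, rfl⟩, x1, ⟨j, hj, rfl⟩, heq⟩
    simp only [Prod.mk.injEq] at heq; omega
  · rintro ⟨h1, h2⟩
    refine ⟨_, ⟨max l l' - l, by omega, rfl⟩, _, ⟨max l l' - l', by omega, rfl⟩, ?_⟩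
    simp only [Prod.mk.injEq]; omega
  · rintro ⟨x, ⟨i, hi, rfl⟩, x1, ⟨j, hj, rfl⟩, heq⟩
    simp only [Prod.mk.injEq] at heq; omega
  · rintro ⟨h1, h2⟩
    refine ⟨_, ⟨l' - l, by omega, rfl⟩, _, ⟨c - c', by omega, rfl⟩, ?_⟩
    simp only [Prod.mk.injEq]; omega
  · rintro ⟨x, ⟨i, hi, rfl⟩, x1, ⟨j, hj, rfl⟩, heq⟩
    simp only [Prod.mk.injEq] at heq; omega
  · rintro ⟨h1, h2⟩
    refine ⟨_, ⟨c' - c, by omega, rfl⟩, _, ⟨l - l', by omega, rfl⟩, ?_⟩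
    simp only [Prod.mk.injEq]; omega
  · rintro ⟨x, ⟨i, hi, rfl⟩, x1, ⟨j, hj, rfl⟩, heq⟩
    simp only [Prod.mk.injEq] at heq; omega
  · rintro ⟨h1, h2⟩
    refine ⟨_, ⟨max c c' - c, by omega, rfl⟩, _, ⟨max c c' - c', by omega, rfl⟩, ?_⟩
    simp only [Prod.mk.injEq]; omega

-- ===== VERDICT (by name: the statement is the Claim_ definition above) =====
theorem check_boat_spec : Claim_equal_check_boat := by
  intro new_boat boats hdom
  clear hdom
  obtain ⟨l, c, L, h⟩ := new_boat
  unfold Spec_check_boat check_boat check_boat_alt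
  dsimp only
  have hany : (boats.any (fun each_boat =>
        (boat_coordinates (l, c, L, h)).any (fun nbcoord =>
          (boat_coordinates each_boat).any (fun ebcoord => nbcoord = ebcoord)))) =
      (!(boats.all (fun b =>
        let (bl, bc, bL, bh) := b
        !(decide (max l bl ≤ min (l + (if h then 0 else L - 1)) (bl + (if bh then 0 else bL - 1))) &&
          decide (max c bc ≤ min (c + (if h then L - 1 else 0)) (bc + (if bh then bL - 1 else 0))))))) := by
    induction boats with
    | nil => rfl
    | cons b bs ih =>
      obtain ⟨l', c', L', h'⟩ := b
      simp only [List.any_cons, List.all_cons, ih, collide_eq_box l c L h l' c' L',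
        Bool.not_and, Bool.not_not, Bool.not_or]
  rw [hany]
  cases hall : boats.all (fun b =>
        let (bl, bc, bL, bh) := b
        !(decide (max l bl ≤ min (l + (if h then 0 else L - 1)) (bl + (if bh then 0 else bL - 1))) &&
          decide (max c bc ≤ min (c + (if h then L - 1 else 0)) (bc + (if bh then bL - 1 else 0))))) <;>
    simp only [Bool.not_false, Bool.not_true, if_true, Bool.false_and, Bool.true_and] <;>
    cases h <;> rw [Bool.eq_iff_iff] <;> simp
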